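-- pv_equiv track=rewrite | github.com/hosung-222/Coding-Test | 프로그래머스/lv3/12938. 최고의 집합/최고의 집합.py | solution
-- ===== SOURCE A (Python) =====
-- def solution(n, s):
--     answer = []
--     if s < n:
--         return [-1]
--
--     for i in range(n):
--         answer.append(s//n)
--         s -= s//n
--         n -= 1
--
--
--     return answer
-- ===== SOURCE B (Python) =====
-- def solution(n, s):
--     if s < n:
--         return [-1]
--     if n <= 0:
--         return []
--     q, r = divmod(s, n)
--     return [q] * (n - r) + [q + 1] * r
-- ===== Notes on version B (the rewrite author's own statement) =====
-- stated objective: simpler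
-- what changed: Replaces the iterative greedy loop that recomputes s//n while shrinking s and n with a single divmod and the closed-form construction [q]*(n-r)+[q+1]*r.
import Mathlib
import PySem

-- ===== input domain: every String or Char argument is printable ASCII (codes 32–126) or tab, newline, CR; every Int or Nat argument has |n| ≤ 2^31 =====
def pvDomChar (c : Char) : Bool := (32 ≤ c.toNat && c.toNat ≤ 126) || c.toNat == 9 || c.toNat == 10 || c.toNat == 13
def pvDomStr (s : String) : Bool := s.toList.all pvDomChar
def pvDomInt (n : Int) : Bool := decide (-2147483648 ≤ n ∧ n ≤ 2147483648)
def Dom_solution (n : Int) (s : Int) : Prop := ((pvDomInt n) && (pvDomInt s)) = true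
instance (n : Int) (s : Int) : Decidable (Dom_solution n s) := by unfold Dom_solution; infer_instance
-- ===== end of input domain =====

-- B replaces A's greedy loop (recomputing s//n while shrinking s and n) by one divmod and a
-- closed-form list [q]*(n-r)+[q+1]*r; objective: simpler.

-- ===== PORT A =====
-- loop body of A: answer.append(s//n); s -= s//n; n -= 1   (state = (answer, s, n))
def solutionStep (st : List Int × Int × Int) (_i : Int) : List Int × Int × Int :=
  (st.1 ++ [PySem.Int.floordiv st.2.1 st.2.2],
   st.2.1 - PySem.Int.floordiv st.2.1 st.2.2,
   st.2.2 - 1)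

def solution (n : Int) (s : Int) : List Int :=
  if s < n then [-1]
  else ((PySem.List.pyRange 0 n 1).foldl solutionStep ([], s, n)).1

-- ===== PORT B =====
def solution_alt (n : Int) (s : Int) : List Int :=
  if s < n then [-1]
  else if n ≤ 0 then []
  else
    let q := PySem.Int.floordiv s n
    let r := PySem.Int.mod s n
    List.replicate (n - r).toNat q ++ List.replicate r.toNat (q + 1)

-- ===== PRECONDITION & SPEC =====
def Spec_solution (n : Int) (s : Int) (out : List Int) : Prop := out = solution_alt n s
instance (n : Int) (s : Int) (out : List Int) : Decidable (Spec_solution n s out) := by unfold Spec_solution; infer_instance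

-- ===== CLAIM (what is proved, stated in full; the proofs are below) =====
def Claim_equal_solution : Prop := ∀ (n : Int) (s : Int), Dom_solution n s → Spec_solution n s (solution n s)

-- ===== LEMMAS AND PROOFS =====

-- A's loop, run over ANY list of length k (the body ignores the index), produces the
-- closed-form most-equal partition.
lemma solution_loop (k : Nat) : ∀ (l : List Int), l.length = k →
    ∀ (ans : List Int) (s n : Int), n = (k : Int) → 0 < k →
    (l.foldl solutionStep (ans, s, n)).1
      = ans ++ List.replicate (k - (s % n).toNat) (s / n)
            ++ List.replicate (s % n).toNat (s / n + 1) := by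
  induction k with
  | zero => intro l _ ans s n _ hk; omega
  | succ k ih =>
    intro l hl ans s n hn _
    obtain ⟨x, t, rfl⟩ : ∃ x t, l = x :: t := by
      cases l with
      | nil => simp at hl
      | cons a b => exact ⟨a, b, rfl⟩
    have ht : t.length = k := by simpa using hl
    have hnpos : (0:Int) < n := by omega
    have hfd : PySem.Int.floordiv s n = s / n := PySem.Int.floordiv_eq_ediv_of_pos hnpos
    have hr0 : 0 ≤ s % n := Int.emod_nonneg s (by omega)
    have hrn : s % n < n := Int.emod_lt_of_pos s hnpos
    have hsplit : s = n * (s / n) + s % n := by have := Int.mul_ediv_add_emod s n; omega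
    simp only [List.foldl_cons, solutionStep, hfd]
    rcases Nat.eq_zero_or_pos k with hk0 | hkpos
    · -- last iteration: n = 1
      subst hk0
      have hn1 : n = 1 := by omega
      obtain rfl : t = [] := List.eq_nil_of_length_eq_zero ht
      subst hn1
      simp
    · -- recursive case: apply ih at (s - s/n, n - 1)
      have hn1pos : (0:Int) < n - 1 := by omega
      have hs' : s - s / n = s % n + (s / n) * (n - 1) := by linarith [hsplit]
      rw [ih t ht _ (s - s / n) (n - 1) (by omega) hkpos]
      rcases lt_or_eq_of_le (by omega : s % n ≤ n - 1) with hlt | heq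
      · -- remainder fits: quotient and remainder unchanged
        have hq : (s - s / n) / (n - 1) = s / n := by
          rw [hs', Int.add_mul_ediv_right _ _ (by omega : n - 1 ≠ 0),
              Int.ediv_eq_zero_of_lt hr0 hlt, zero_add]
        have hm : (s - s / n) % (n - 1) = s % n := by
          rw [hs']; simp [Int.emod_eq_of_lt hr0 hlt]
        rw [hq, hm]
        have htn : (s % n).toNat ≤ k := by omega
        have : k + 1 - (s % n).toNat = (k - (s % n).toNat) + 1 := by omega
        rw [this, List.replicate_succ]
        simp
      · -- remainder = n-1: quotient bumps, remainder 0
        have hq : (s - s / n) / (n - 1) = s / n + 1 := by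
          rw [hs', ← heq]
          rw [show s % n + s / n * (s % n) = (s / n + 1) * (s % n) by ring]
          rw [Int.mul_ediv_cancel _ (by omega)]
        have hm : (s - s / n) % (n - 1) = 0 := by
          rw [hs', ← heq]
          rw [show s % n + s / n * (s % n) = (s / n + 1) * (s % n) by ring]
          exact Int.mul_emod_left _ _
        rw [hq, hm]
        have : (s % n).toNat = k := by omega
        rw [this]
        simp

-- ===== VERDICT (by name: the statement is the Claim_ definition above) =====
theorem solution_spec : Claim_equal_solution := by
  intro n s _
  unfold Spec_solution solution solution_alt
  by_cases hlt : s < n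
  · simp [hlt]
  · simp only [hlt, if_false]
    by_cases hn : n ≤ 0
    · rw [PySem.List.pyRange_one_eq_nil (by omega)]
      simp [hn]
    · have hnpos : (0:Int) < n := by omega
      have hlen : (PySem.List.pyRange 0 n 1).length = n.toNat := by
        rw [PySem.List.length_pyRange_one]; omega
      rw [solution_loop n.toNat _ hlen [] s n (by omega) (by omega)]
      have hfd : PySem.Int.floordiv s n = s / n := PySem.Int.floordiv_eq_ediv_of_pos hnpos
      have hmd : PySem.Int.mod s n = s % n := PySem.Int.mod_eq_emod_of_pos hnpos
      have hr0 : 0 ≤ s % n := Int.emod_nonneg s (by omega)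
      have hrn : s % n < n := Int.emod_lt_of_pos s hnpos
      simp only [hn, if_false, hfd, hmd]
      have : (n - s % n).toNat = n.toNat - (s % n).toNat := by omega
      rw [this]
      simp
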